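-- pv_equiv track=rewrite | github.com/pypi-data/pypi-mirror-352 | packages/neatcpp/neatcpp-1.2.0.tar.gz/neatcpp-1.2.0/src/neatcpp/neatcpp.py | __extract_macro_ref_args
-- ===== SOURCE A (Python) =====
-- def __extract_macro_ref_args(args_code: str) -> list[str]:
--     args = []
--     args_code = args_code.strip().replace("\n", "")
--     temp_args = [arg for arg in args_code.split(",")]
--     arg_idx = 0
--     args.append(temp_args[0])
--     for temp_arg in temp_args[1:]:
--         # Check if the argument args[arg_idx] does not contain uneven number of parentheses or apostrophes, e.g. "value(1".
--         # If yes, then the argument is incomplete and the next argument temp_arg needs to be added to it, e.g. "value(1, 2)".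
--         if ((args[arg_idx].count("\"") & 1) or (args[arg_idx].count("\'") & 1) or
--                 (args[arg_idx].count("(") != args[arg_idx].count(")"))):
--             args[arg_idx] = f"{args[arg_idx]}, {temp_arg}"
--         else:
--             args.append(temp_arg.strip())
--             arg_idx += 1
--     return args
-- ===== SOURCE B (Python) =====
-- def __extract_macro_ref_args(args_code: str) -> list[str]:
--     # One pass: keep running quote/paren counters for the current argument
--     # instead of re-counting the (growing) argument on every fragment.
--     frags = args_code.strip().replace("\n", "").split(",")
--     done = []
--     cur = frags[0]
--     dq = cur.count('"'); sq = cur.count("'"); op = cur.count("("); cl = cur.count(")")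
--     for frag in frags[1:]:
--         if dq % 2 or sq % 2 or op != cl:
--             cur = f"{cur}, {frag}"
--         else:
--             done.append(cur)
--             cur = frag.strip()
--             dq = sq = op = cl = 0
--         dq += frag.count('"'); sq += frag.count("'")
--         op += frag.count("("); cl += frag.count(")")
--     done.append(cur)
--     return done
-- ===== Notes on version B (the rewrite author's own statement) =====
-- stated objective: faster
-- what changed: B makes a single pass keeping running quote/parenthesis counters per current argument, where A re-counts the whole growing current argument on every comma fragment, which is quadratic when one unbalanced argument spans many fragments.
import Mathlib
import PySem

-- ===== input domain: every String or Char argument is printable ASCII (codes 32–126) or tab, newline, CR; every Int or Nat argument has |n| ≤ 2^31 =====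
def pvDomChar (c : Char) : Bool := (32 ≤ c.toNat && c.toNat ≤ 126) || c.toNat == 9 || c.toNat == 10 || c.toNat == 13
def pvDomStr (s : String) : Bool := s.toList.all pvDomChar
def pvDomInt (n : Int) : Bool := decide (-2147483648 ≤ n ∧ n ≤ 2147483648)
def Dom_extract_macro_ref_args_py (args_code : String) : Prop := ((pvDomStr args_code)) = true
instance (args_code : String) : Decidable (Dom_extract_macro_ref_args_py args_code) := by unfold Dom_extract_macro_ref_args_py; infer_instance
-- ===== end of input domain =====

-- B replaces A's re-counting of the growing current argument on every fragment by
-- running per-argument counters, one pass over the fragments (objective: faster).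

-- ===== PORT A =====
-- the for-loop of A; args/arg_idx are the Python variables
def pvALoop (args : List String) (arg_idx : Nat) : List String → List String
  | [] => args
  | temp_arg :: rest =>
    let cur := (PySem.List.pyGet? args (arg_idx : Int)).getD ""
    if (PySem.Str.count cur "\"") &&& 1 ≠ 0 ∨ (PySem.Str.count cur "'") &&& 1 ≠ 0 ∨
        PySem.Str.count cur "(" ≠ PySem.Str.count cur ")" then
      pvALoop (args.set arg_idx (cur ++ ", " ++ temp_arg)) arg_idx rest
    else
      pvALoop (args ++ [PySem.Str.strip temp_arg]) (arg_idx + 1) rest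

def extract_macro_ref_args_py (args_code : String) : List String :=
  let ac := PySem.Str.replace (PySem.Str.strip args_code) "\n" ""
  -- split? is some (sep = "," ≠ "") and never returns []; the .getD defaults are unreachable
  let temp_args := (PySem.Str.split? ac ",").getD []
  pvALoop [(PySem.List.pyGet? temp_args (0 : Int)).getD ""] 0
    (PySem.List.slice temp_args (some 1) none)

-- ===== PORT B =====
-- the for-loop of B; done/cur/dq/sq/op/cl are the Python variables
def pvBLoop (done : List String) (cur : String) (dq sq op cl : Nat) :
    List String → List String
  | [] => done ++ [cur]
  | frag :: rest =>
    if dq % 2 ≠ 0 ∨ sq % 2 ≠ 0 ∨ op ≠ cl then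
      pvBLoop done (cur ++ ", " ++ frag)
        (dq + PySem.Str.count frag "\"") (sq + PySem.Str.count frag "'")
        (op + PySem.Str.count frag "(") (cl + PySem.Str.count frag ")") rest
    else
      pvBLoop (done ++ [cur]) (PySem.Str.strip frag)
        (PySem.Str.count frag "\"") (PySem.Str.count frag "'")
        (PySem.Str.count frag "(") (PySem.Str.count frag ")") rest

def extract_macro_ref_args_py_alt (args_code : String) : List String :=
  let frags := (PySem.Str.split? (PySem.Str.replace (PySem.Str.strip args_code) "\n" "") ",").getD []
  let cur := (PySem.List.pyGet? frags (0 : Int)).getD ""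
  pvBLoop [] cur (PySem.Str.count cur "\"") (PySem.Str.count cur "'")
    (PySem.Str.count cur "(") (PySem.Str.count cur ")")
    (PySem.List.slice frags (some 1) none)

-- ===== PRECONDITION & SPEC =====
def Spec_extract_macro_ref_args_py (args_code : String) (out : List String) : Prop := out = extract_macro_ref_args_py_alt args_code
instance (args_code : String) (out : List String) : Decidable (Spec_extract_macro_ref_args_py args_code out) := by unfold Spec_extract_macro_ref_args_py; infer_instance

-- ===== CLAIM (what is proved, stated in full; the proofs are below) =====
def Claim_equal_extract_macro_ref_args_py : Prop := ∀ (args_code : String), Dom_extract_macro_ref_args_py args_code → Spec_extract_macro_ref_args_py args_code (extract_macro_ref_args_py args_code)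

-- ===== LEMMAS AND PROOFS =====

-- Python's substring count for a single-character needle is the character count.
theorem pv_count_go_singleton (c : Char) (l : List Char) : ∀ (fuel acc : Nat),
    l.length ≤ fuel → PySem.Chars.count.go [c] fuel l acc = acc + l.count c := by
  induction l with
  | nil => intro fuel acc _; cases fuel <;> simp [PySem.Chars.count.go]
  | cons hd tl ih =>
    intro fuel acc h
    cases fuel with
    | zero => simp at h
    | succ f =>
      have hstep : PySem.Chars.count.go [c] (f + 1) (hd :: tl) acc =
          if [c].isPrefixOf (hd :: tl) = true then PySem.Chars.count.go [c] f tl (acc + 1)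
          else PySem.Chars.count.go [c] f tl acc := rfl
      have hlen : tl.length ≤ f := by simpa using h
      rw [hstep]
      by_cases hc : c = hd
      · rw [if_pos (by simp [List.isPrefixOf, hc]), ih f (acc + 1) hlen]
        have : (hd :: tl).count c = tl.count c + 1 := by
          simp [hc]
        rw [this]; omega
      · rw [if_neg (by simp [List.isPrefixOf, hc]), ih f acc hlen]
        have : (hd :: tl).count c = tl.count c := by
          simp [List.count_cons]
          exact Ne.symm hc
        rw [this]

theorem pv_count_singleton (l : List Char) (c : Char) :
    PySem.Chars.count l [c] = l.count c := by
  simpa [PySem.Chars.count] using pv_count_go_singleton c l l.length 0 le_rfl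

theorem pv_strCount (s t : String) (c : Char) (h : t.toList = [c]) :
    PySem.Str.count s t = s.toList.count c := by
  simp [PySem.Str.count, h, pv_count_singleton]

theorem pv_count_dropWhile (p : Char → Bool) (l : List Char) (c : Char)
    (hc : p c = false) : (l.dropWhile p).count c = l.count c := by
  conv_rhs => rw [← List.takeWhile_append_dropWhile (p := p) (l := l)]
  rw [List.count_append]
  have : (l.takeWhile p).count c = 0 := by
    rw [List.count_eq_zero]
    intro hm
    have := List.mem_takeWhile_imp hm
    simp [hc] at this
  omega

theorem pv_count_strip (l : List Char) (c : Char)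
    (hc : PySem.Chars.isspace c = false) :
    (PySem.Chars.strip l).count c = l.count c := by
  simp only [PySem.Chars.strip, PySem.Chars.rstrip, PySem.Chars.lstrip]
  rw [List.count_reverse, pv_count_dropWhile _ _ _ hc, List.count_reverse,
    pv_count_dropWhile _ _ _ hc]

theorem pv_strip_count (s : String) (c : Char)
    (hc : PySem.Chars.isspace c = false) :
    (PySem.Str.strip s).toList.count c = s.toList.count c := by
  rw [PySem.Str.toList_strip, pv_count_strip _ _ hc]

theorem pv_set_concat (done : List String) (cur v : String) :
    (done ++ [cur]).set done.length v = done ++ [v] := by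
  induction done with
  | nil => rfl
  | cons d ds ih => simp [ih]

theorem pv_get_concat (done : List String) (cur : String) :
    (PySem.List.pyGet? (done ++ [cur]) (done.length : Int)).getD "" = cur := by
  simp

theorem pv_loop_eq (rest : List String) : ∀ (done : List String) (cur : String),
    pvALoop (done ++ [cur]) done.length rest =
      pvBLoop done cur (cur.toList.count '"') (cur.toList.count '\'')
        (cur.toList.count '(') (cur.toList.count ')') rest := by
  induction rest with
  | nil => intro done cur; rfl
  | cons frag rest ih =>
    intro done cur
    rw [pvALoop, pvBLoop]
    simp only [pv_get_concat]
    rw [pv_strCount cur "\"" '"' rfl, pv_strCount cur "'" '\'' rfl,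
      pv_strCount cur "(" '(' rfl, pv_strCount cur ")" ')' rfl,
      pv_strCount frag "\"" '"' rfl, pv_strCount frag "'" '\'' rfl,
      pv_strCount frag "(" '(' rfl, pv_strCount frag ")" ')' rfl,
      Nat.and_one_is_mod, Nat.and_one_is_mod]
    by_cases hcond : cur.toList.count '"' % 2 ≠ 0 ∨ cur.toList.count '\'' % 2 ≠ 0 ∨
        cur.toList.count '(' ≠ cur.toList.count ')'
    · rw [if_pos hcond, if_pos hcond, pv_set_concat, ih done]
      congr 1 <;>
        · rw [String.toList_append, String.toList_append, List.count_append, List.count_append]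
          have h1 : List.count '"' ", ".toList = 0 := by decide
          have h2 : List.count '\'' ", ".toList = 0 := by decide
          have h3 : List.count '(' ", ".toList = 0 := by decide
          have h4 : List.count ')' ", ".toList = 0 := by decide
          omega
    · rw [if_neg hcond, if_neg hcond]
      have h := ih (done ++ [cur]) (PySem.Str.strip frag)
      simp only [List.length_append, List.length_singleton] at h
      rw [pv_strip_count frag '"' (by decide), pv_strip_count frag '\'' (by decide),
        pv_strip_count frag '(' (by decide), pv_strip_count frag ')' (by decide)] at h
      exact h

-- ===== VERDICT (by name: the statement is the Claim_ definition above) =====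
theorem extract_macro_ref_args_py_spec : Claim_equal_extract_macro_ref_args_py := by
  intro args_code _
  unfold Spec_extract_macro_ref_args_py
  simp only [extract_macro_ref_args_py, extract_macro_ref_args_py_alt]
  rw [pv_strCount _ "\"" '"' rfl, pv_strCount _ "'" '\'' rfl,
    pv_strCount _ "(" '(' rfl, pv_strCount _ ")" ')' rfl]
  exact pv_loop_eq _ [] _
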